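-- pv_equiv track=rewrite | github.com/yukikitayama/leetcode-python | hard/hard_2141_maximum_running_time_of_n_computers.py | maxRunTime1
-- ===== SOURCE A (Python) =====
-- from typing import List
--
-- def maxRunTime1(n: int, batteries: List[int]) -> int:
--     batteries.sort()
--
--     live = batteries[-n:]
--
--     extra = sum(batteries[:-n])
--
--     for i in range(n - 1):
--
--         # Additional power needed to increase running time
--         diff = live[i + 1] - live[i]
--
--         # i is 0-based index
--         num_computer_add_power = i + 1
--
--         # If we have enough extra power
--         if extra // num_computer_add_power >= diff:
--             # Reduce extra power to use it
--             extra -= diff * num_computer_add_power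
--
--         # If it's not sufficient, then stop iteration and return as much as
--         # we can additionally supply by remaining extra
--         else:
--             return live[i] + extra // num_computer_add_power
--
--     # If we still have power, distribute
--     return live[-1] + extra // n
-- ===== SOURCE B (Python) =====
-- from typing import List
--
-- # Closed-form alternative: the answer is the minimum over k of
-- # (leftover energy + energy of the k weakest of the top-n batteries) // k.
-- # batteries.sort() also reproduces A's in-place mutation of the argument.
-- def maxRunTime1(n: int, batteries: List[int]) -> int:
--     batteries.sort()
--     k = 0
--     acc = sum(batteries[:-n])
--     best = None
--     for b in batteries[-n:]:
--         k += 1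
--         acc += b
--         cap = acc // k
--         if best is None or cap < best:
--             best = cap
--     return best
-- ===== Notes on version B (the rewrite author's own statement) =====
-- stated objective: alternative
-- what changed: Replaces A's greedy level-filling loop with early return (simulating how the extra budget is spent on adjacent gaps of the top-n batteries) by a closed-form single pass: the answer is the minimum over k of (leftover + sum of the k weakest of the top n) // k, computed as a running min of prefix floor-averages.
-- outside the precondition, e.g. on maxRunTime1(-1, [5, 3]): A returns 2, B returns 8; on maxRunTime1(0, [1, 2]): A raises ZeroDivisionError, B returns 1; on maxRunTime1(3, [1, 1]): A raises IndexError, B returns 1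
import Mathlib
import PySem

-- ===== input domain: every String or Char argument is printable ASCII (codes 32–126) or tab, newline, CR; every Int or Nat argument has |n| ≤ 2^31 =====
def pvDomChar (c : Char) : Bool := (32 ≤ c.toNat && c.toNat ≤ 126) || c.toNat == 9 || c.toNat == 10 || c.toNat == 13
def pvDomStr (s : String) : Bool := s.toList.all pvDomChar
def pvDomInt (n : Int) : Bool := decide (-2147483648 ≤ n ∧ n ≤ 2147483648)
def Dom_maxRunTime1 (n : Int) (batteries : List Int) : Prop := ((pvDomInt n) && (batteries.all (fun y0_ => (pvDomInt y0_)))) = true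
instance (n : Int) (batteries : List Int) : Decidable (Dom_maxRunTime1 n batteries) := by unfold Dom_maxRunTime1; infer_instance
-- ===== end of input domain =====

-- B replaces A's greedy level-filling loop with early return by a closed-form single pass:
-- the answer is the minimum over k of (leftover + sum of the k weakest of the top n) // k.
-- Both A and B sort `batteries` in place in Python; the equivalence proved is about the return value.

-- ===== PORT A =====
-- the for-loop 'for i in range(n - 1)' with its early return, as a counter recursion on i
def pvALoop (live : List Int) (n : Int) (extra : Int) (i : Int) : Int :=
  if h : i < n - 1 then
    let diff := PySem.List.pyGetD live (i + 1) 0 - PySem.List.pyGetD live i 0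
    let numComputerAddPower := i + 1
    if PySem.Int.floordiv extra numComputerAddPower ≥ diff then
      pvALoop live n (extra - diff * numComputerAddPower) (i + 1)
    else
      PySem.List.pyGetD live i 0 + PySem.Int.floordiv extra numComputerAddPower
  else
    -- return live[-1] + extra // n
    PySem.List.pyGetD live (-1) 0 + PySem.Int.floordiv extra n
termination_by (n - 1 - i).toNat
decreasing_by omega

def maxRunTime1 (n : Int) (batteries : List Int) : Int :=
  let bs := PySem.List.sorted batteries (fun x => x) false   -- batteries.sort()
  let live := PySem.List.slice bs (some (-n)) none            -- batteries[-n:]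
  let extra := (PySem.List.slice bs none (some (-n))).sum     -- sum(batteries[:-n])
  pvALoop live n extra 0

-- ===== PORT B =====
-- one iteration of B's loop: state (k, acc, best), next battery b
def pvBStep (s : Int × Int × Option Int) (b : Int) : Int × Int × Option Int :=
  let k := s.1 + 1
  let acc := s.2.1 + b
  let cap := PySem.Int.floordiv acc k
  match s.2.2 with
  | none => (k, acc, some cap)
  | some v => (k, acc, if cap < v then some cap else some v)

def maxRunTime1_alt (n : Int) (batteries : List Int) : Int :=
  let bs := PySem.List.sorted batteries (fun x => x) false   -- batteries.sort()
  let st := (PySem.List.slice bs (some (-n)) none).foldl pvBStep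
      (0, (PySem.List.slice bs none (some (-n))).sum, none)
  (st.2.2).getD 0   -- Python returns best (an int on every admitted input; None only outside Pre_)

-- ===== PRECONDITION & SPEC =====
-- Pre_ excludes n ≤ 0 (A raises ZeroDivisionError/IndexError for n = 0 and for negative n
-- returns accidents of negative-slice and floor-by-negative arithmetic) and the inputs with
-- n > len(batteries) and all batteries equal, on which A raises IndexError.
def Pre_maxRunTime1 (n : Int) (batteries : List Int) : Prop :=
  1 ≤ n ∧ (n ≤ batteries.length ∨ ∃ a ∈ batteries, ∃ b ∈ batteries, a ≠ b)
instance (n : Int) (batteries : List Int) : Decidable (Pre_maxRunTime1 n batteries) := by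
  unfold Pre_maxRunTime1; infer_instance

def pvWitness_maxRunTime1 : Int × List Int := (2, [3, 3, 3])

def Spec_maxRunTime1 (n : Int) (batteries : List Int) (out : Int) : Prop := out = maxRunTime1_alt n batteries
instance (n : Int) (batteries : List Int) (out : Int) : Decidable (Spec_maxRunTime1 n batteries out) := by unfold Spec_maxRunTime1; infer_instance

-- ===== CLAIM (what is proved, stated in full; the proofs are below) =====
def Claim_equal_maxRunTime1 : Prop := ∀ (n : Int) (batteries : List Int), Dom_maxRunTime1 n batteries → Pre_maxRunTime1 n batteries → Spec_maxRunTime1 n batteries (maxRunTime1 n batteries)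

-- ===== LEMMAS AND PROOFS =====

-- the candidate value for k = j+1 computers: (E0 + sum of the j+1 weakest live batteries) // (j+1)
def pvC (live : List Int) (E0 : Int) (j : Nat) : Int :=
  (E0 + (live.take (j + 1)).sum) / ((j : Int) + 1)

-- B's fold keeps best = min of the caps seen so far
theorem pvBFold_inv (live : List Int) (E0 : Int) :
    ∀ (rest : List Int) (m : Nat) (best : Option Int),
      live.drop m = rest → m ≤ live.length →
      (match best with
       | none => m = 0
       | some v => (∃ j, j < m ∧ v = pvC live E0 j) ∧ (∀ j, j < m → v ≤ pvC live E0 j)) →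
      (match (rest.foldl pvBStep ((m : Int), E0 + (live.take m).sum, best)).2.2 with
       | none => live.length = 0
       | some v => (∃ j, j < live.length ∧ v = pvC live E0 j) ∧
                   (∀ j, j < live.length → v ≤ pvC live E0 j)) := by
  intro rest
  induction rest with
  | nil =>
    intro m best hdrop hmle hinv
    have hm : live.length ≤ m := by
      have := congrArg List.length hdrop
      rw [List.length_drop] at this
      simp at this
      omega
    match best, hinv with
    | none, hinv =>
      simp only [List.foldl_nil]
      have hz : live.length = 0 := by omega
      simpa using hz
    | some v, ⟨⟨j, hj, hveq⟩, hble⟩ =>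
      simp only [List.foldl_nil]
      exact ⟨⟨j, by omega, hveq⟩, fun j2 hj2 => hble j2 (by omega)⟩
  | cons b rest ih =>
    intro m best hdrop hmle hinv
    have hm : m < live.length := by
      have := congrArg List.length hdrop
      rw [List.length_drop] at this
      simp at this
      omega
    have hcons := List.drop_eq_getElem_cons hm
    rw [hdrop] at hcons
    rw [List.cons.injEq] at hcons
    obtain ⟨hb, hrest2⟩ := hcons
    have hrest : live.drop (m + 1) = rest := hrest2.symm
    have hacc : E0 + (live.take m).sum + b = E0 + (live.take (m + 1)).sum := by
      rw [List.sum_take_succ live m hm, hb]; ring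
    have hcap : PySem.Int.floordiv (E0 + (live.take (m + 1)).sum) ((m : Int) + 1)
        = pvC live E0 m := by
      rw [PySem.Int.floordiv_eq_ediv_of_pos (by omega)]
      rfl
    simp only [List.foldl_cons]
    match best, hinv with
    | none, hinv =>
      have hstep : pvBStep ((m : Int), E0 + (live.take m).sum, none) b
          = ((m : Int) + 1, E0 + (live.take (m + 1)).sum, some (pvC live E0 m)) := by
        simp only [pvBStep, hcap, hacc]
      rw [hstep]
      have hm0 : m = 0 := hinv
      subst hm0
      have := ih 1 (some (pvC live E0 0)) hrest (by omega)
        (by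
          refine ⟨⟨0, by omega, rfl⟩, ?_⟩
          intro j hj
          have : j = 0 := by omega
          simp [this])
      simpa using this
    | some v, ⟨⟨j, hj, hveq⟩, hble⟩ =>
      by_cases hlt : pvC live E0 m < v
      · have hstep : pvBStep ((m : Int), E0 + (live.take m).sum, some v) b
            = ((m : Int) + 1, E0 + (live.take (m + 1)).sum, some (pvC live E0 m)) := by
          simp only [pvBStep, hcap, hacc, if_pos hlt]
        rw [hstep]
        have := ih (m + 1) (some (pvC live E0 m)) hrest (by omega)
          (by
            refine ⟨⟨m, by omega, rfl⟩, ?_⟩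
            intro j2 hj2
            rcases Nat.lt_or_ge j2 m with h2 | h2
            · exact le_trans (le_of_lt hlt) (hble j2 h2)
            · have : j2 = m := by omega
              simp [this])
        simpa using this
      · have hstep : pvBStep ((m : Int), E0 + (live.take m).sum, some v) b
            = ((m : Int) + 1, E0 + (live.take (m + 1)).sum, some v) := by
          simp only [pvBStep, hcap, hacc, if_neg hlt]
        rw [hstep]
        have := ih (m + 1) (some v) hrest (by omega)
          (by
            refine ⟨⟨j, by omega, hveq⟩, ?_⟩
            intro j2 hj2
            rcases Nat.lt_or_ge j2 m with h2 | h2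
            · exact hble j2 h2
            · have : j2 = m := by omega
              subst this
              omega)
        simpa using this

-- the mediant step: if the next battery fits under the current cap, the cap cannot increase
theorem pvC_succ_le (live : List Int) (E0 : Int) (i : Nat) (hi1 : i + 1 < live.length)
    (hx : live[i + 1] ≤ pvC live E0 i) : pvC live E0 (i + 1) ≤ pvC live E0 i := by
  unfold pvC at *
  set S := E0 + (live.take (i + 1)).sum with hS
  set k : Int := (i : Int) + 1 with hk
  have hkpos : 0 < k := by omega
  have hsum : E0 + (live.take (i + 1 + 1)).sum = S + live[i + 1] := by
    rw [List.sum_take_succ live (i + 1) hi1, hS]; ring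
  rw [hsum]
  have hcast : ((i + 1 : Nat) : Int) + 1 = k + 1 := by push_cast; ring
  rw [hcast]
  have h1 := Int.mul_ediv_add_emod S k
  have h2 := Int.emod_nonneg S (by omega : k ≠ 0)
  have h3 := Int.emod_lt_of_pos S hkpos
  have h4 := Int.mul_ediv_add_emod (S + live[i + 1]) (k + 1)
  have h5 := Int.emod_nonneg (S + live[i + 1]) (by omega : k + 1 ≠ 0)
  by_contra hcon
  push Not at hcon
  have h6 : S / k + 1 ≤ (S + live[i + 1]) / (k + 1) := by omega
  have h7 : (k + 1) * (S / k + 1) ≤ (k + 1) * ((S + live[i + 1]) / (k + 1)) :=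
    mul_le_mul_of_nonneg_left h6 (by omega)
  nlinarith

-- if the next battery exceeds the current cap, every later cap is at least the current one
theorem pvC_ge_of_lt (live : List Int) (E0 : Int) (i : Nat) (hi1 : i + 1 < live.length)
    (hmono : ∀ p q (hp : p < live.length) (hq : q < live.length), p ≤ q → live[p] ≤ live[q])
    (hx : pvC live E0 i < live[i + 1]) :
    ∀ j, i ≤ j → j < live.length → pvC live E0 i ≤ pvC live E0 j := by
  set t := pvC live E0 i with ht
  have hTbound : ∀ j, i ≤ j → j < live.length →
      ((j : Int) + 1) * t ≤ E0 + (live.take (j + 1)).sum := by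
    intro j hij hjlen
    induction j, hij using Nat.le_induction with
    | base =>
      have h1 := Int.mul_ediv_add_emod (E0 + (live.take (i + 1)).sum) ((i : Int) + 1)
      have h2 := Int.emod_nonneg (E0 + (live.take (i + 1)).sum) (by omega : ((i : Int) + 1) ≠ 0)
      rw [ht]
      unfold pvC
      omega
    | succ j hij ihj =>
      have hjlen' : j < live.length := by omega
      have hrec := ihj hjlen'
      rw [List.sum_take_succ live (j + 1) hjlen]
      have hmem : live[i + 1] ≤ live[j + 1] := hmono (i + 1) (j + 1) hi1 hjlen (by omega)
      have htle : t ≤ live[j + 1] := by omega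
      push_cast
      nlinarith
  intro j hij hjlen
  unfold pvC
  rw [ht]
  refine (Int.le_ediv_iff_mul_le (by omega : (0:Int) < (j : Int) + 1)).mpr ?_
  have := hTbound j hij hjlen
  linarith [this]

-- A's greedy loop returns the minimum of the remaining caps (case 1 ≤ n ≤ len)
theorem pvALoop_min (live : List Int) (E0 n : Int) (hlen : live.length = n.toNat) (hn : 1 ≤ n)
    (hmono : ∀ p q (hp : p < live.length) (hq : q < live.length), p ≤ q → live[p] ≤ live[q]) :
    ∀ (i : Nat) (hi : i < live.length) (extra : Int),
      extra = E0 + (live.take i).sum - i * live[i] →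
      (∃ j, i ≤ j ∧ j < live.length ∧
        pvALoop live n extra (i : Int) = pvC live E0 j) ∧
      (∀ j, i ≤ j → j < live.length →
        pvALoop live n extra (i : Int) ≤ pvC live E0 j) := by
  suffices H : ∀ (k : Nat) (i : Nat) (hi : i < live.length) (extra : Int),
      live.length - i ≤ k →
      extra = E0 + (live.take i).sum - i * live[i] →
      (∃ j, i ≤ j ∧ j < live.length ∧
        pvALoop live n extra (i : Int) = pvC live E0 j) ∧
      (∀ j, i ≤ j → j < live.length →
        pvALoop live n extra (i : Int) ≤ pvC live E0 j) by
    intro i hi extra hval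
    exact H (live.length - i) i hi extra le_rfl hval
  intro k
  induction k with
  | zero =>
    intro i hi extra hk
    exact absurd hk (by omega)
  | succ k ih =>
    intro i hi extra hk hval
    have hnn : ((n.toNat : Nat) : Int) = n := Int.toNat_of_nonneg (by omega)
    have hT : E0 + (live.take (i + 1)).sum = extra + (i : Int) * live[i] + live[i] := by
      rw [List.sum_take_succ live i hi, hval]; ring
    by_cases hilt : (i : Int) < n - 1
    · have hi1 : i + 1 < live.length := by omega
      have hcast1 : ((i : Int) + 1) = ((i + 1 : Nat) : Int) := by push_cast; ring
      rw [pvALoop]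
      rw [dif_pos hilt]
      simp only [ge_iff_le]
      rw [hcast1, PySem.List.pyGetD_natCast, PySem.List.pyGetD_natCast,
        List.getD_eq_getElem live 0 hi1, List.getD_eq_getElem live 0 hi,
        PySem.Int.floordiv_eq_ediv_of_pos (by omega : (0:Int) < (i + 1 : Nat))]
      have hcond : (live[i + 1] - live[i] ≤ extra / ((i + 1 : Nat) : Int))
          ↔ live[i + 1] ≤ pvC live E0 i := by
        rw [Int.le_ediv_iff_mul_le (by omega : (0:Int) < ((i + 1 : Nat) : Int))]
        unfold pvC
        rw [Int.le_ediv_iff_mul_le (by omega : (0:Int) < (i : Int) + 1), hT]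
        push_cast
        constructor <;> intro hz <;> nlinarith
      by_cases hc : live[i + 1] - live[i] ≤ extra / ((i + 1 : Nat) : Int)
      · rw [if_pos hc]
        have hx : live[i + 1] ≤ pvC live E0 i := hcond.mp hc
        obtain ⟨⟨j, hj1, hj2, heq⟩, hle⟩ := ih (i + 1) hi1
          (extra - (live[i + 1] - live[i]) * ((i + 1 : Nat) : Int)) (by omega)
          (by rw [List.sum_take_succ live i hi]; push_cast; linear_combination hval)
        refine ⟨⟨j, by omega, hj2, heq⟩, ?_⟩
        intro j2 hj21 hj22
        rcases Nat.lt_or_ge i j2 with h2 | h2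
        · exact hle j2 (by omega) hj22
        · have hj2i : j2 = i := by omega
          rw [hj2i]
          calc pvALoop live n (extra - (live[i + 1] - live[i]) * ((i + 1 : Nat) : Int))
                ((i + 1 : Nat) : Int)
              ≤ pvC live E0 (i + 1) := hle (i + 1) le_rfl hi1
            _ ≤ pvC live E0 i := pvC_succ_le live E0 i hi1 hx
      · rw [if_neg hc]
        have hx : pvC live E0 i < live[i + 1] := by
          by_contra hcon
          push Not at hcon
          exact hc (hcond.mpr hcon)
        have hres : live[i] + extra / ((i + 1 : Nat) : Int) = pvC live E0 i := by
          have hsub : extra = (E0 + (live.take (i + 1)).sum) + (-live[i]) * ((i + 1 : Nat) : Int) := by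
            rw [hT]; push_cast; ring
          rw [hsub, Int.add_mul_ediv_right _ _ (by omega : ((i + 1 : Nat) : Int) ≠ 0)]
          unfold pvC
          rw [← hcast1]
          ring
        rw [hres]
        exact ⟨⟨i, le_rfl, hi, rfl⟩, fun j hj1 hj2 => pvC_ge_of_lt live E0 i hi1 hmono hx j hj1 hj2⟩
    · have hieq : (i : Int) = n - 1 := by omega
      have hne : live ≠ [] := by
        intro hnil
        rw [hnil] at hi
        exact absurd hi (by simp)
      rw [pvALoop, dif_neg (by omega : ¬ (i : Int) < n - 1)]
      rw [PySem.List.pyGetD_neg_one live 0 hne, List.getLast_eq_getElem,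
        PySem.Int.floordiv_eq_ediv_of_pos (by omega : (0:Int) < n)]
      have hidx : live.length - 1 = i := by omega
      simp only [hidx]
      have hres : live[i] + extra / n = pvC live E0 i := by
        have hni : ((i : Int) + 1) = n := by omega
        have hsub : extra = (E0 + (live.take (i + 1)).sum) + (-live[i]) * n := by
          rw [hT, ← hni]; ring
        rw [hsub, Int.add_mul_ediv_right _ _ (by omega : n ≠ 0)]
        unfold pvC
        rw [hni]
        ring
      rw [hres]
      refine ⟨⟨i, le_rfl, hi, rfl⟩, ?_⟩
      intro j hj1 hj2
      have hji : j = i := by omega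
      rw [hji]

-- A's loop on a flat prefix with no leftover returns the minimum battery (case n > len)
theorem pvALoop_flat (live : List Int) (n : Int) (h0 : 0 < live.length)
    (hLn : (live.length : Int) < n)
    (hmono : ∀ p q (hp : p < live.length) (hq : q < live.length), p ≤ q → live[p] ≤ live[q]) :
    ∀ (k : Nat) (i : Nat) (hi : i < live.length),
      live.length - i ≤ k →
      (∀ p (hp : p < live.length), p ≤ i → live[p] = live[0]) →
      (∃ p, i < p ∧ ∃ (hp : p < live.length), live[p] ≠ live[0]) →
      pvALoop live n 0 (i : Int) = live[0] := by
  intro k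
  induction k with
  | zero =>
    intro i hi hk
    exact absurd hk (by omega)
  | succ k ih =>
    intro i hi hk hpre hex
    obtain ⟨p, hip, hp, hpne⟩ := hex
    have hi1 : i + 1 < live.length := by omega
    have hilt : (i : Int) < n - 1 := by omega
    have hcast1 : ((i : Int) + 1) = ((i + 1 : Nat) : Int) := by push_cast; ring
    rw [pvALoop]
    rw [dif_pos hilt]
    simp only [ge_iff_le]
    rw [hcast1, PySem.List.pyGetD_natCast, PySem.List.pyGetD_natCast,
      List.getD_eq_getElem live 0 hi1, List.getD_eq_getElem live 0 hi,
      PySem.Int.floordiv_eq_ediv_of_pos (by omega : (0:Int) < (i + 1 : Nat)), Int.zero_ediv]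
    by_cases heq2 : live[i + 1] = live[i]
    · rw [if_pos (by omega : live[i + 1] - live[i] ≤ 0)]
      have hz : 0 - (live[i + 1] - live[i]) * ((i + 1 : Nat) : Int) = 0 := by
        rw [heq2]; ring
      rw [hz]
      have hprev : live[i] = live[0] := hpre i hi le_rfl
      have hp1 : i + 1 < p := by
        rcases Nat.lt_or_ge (i + 1) p with h | h
        · exact h
        · have : p = i + 1 := by omega
          subst this
          exact absurd (heq2.trans hprev) hpne
      exact ih (i + 1) hi1 (by omega)
        (fun p2 hp2 hle2 => by
          rcases Nat.lt_or_ge p2 (i + 1) with h | h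
          · exact hpre p2 hp2 (by omega)
          · have hpe : p2 = i + 1 := by omega
            subst hpe
            exact heq2.trans hprev)
        ⟨p, hp1, hp, hpne⟩
    · have hgt2 : live[i] < live[i + 1] :=
        lt_of_le_of_ne (hmono i (i + 1) hi hi1 (by omega)) (fun h => heq2 h.symm)
      rw [if_neg (by omega : ¬ live[i + 1] - live[i] ≤ 0)]
      rw [hpre i hi le_rfl]
      ring

-- with no leftover every cap is at least the minimum battery, and cap 0 attains it
theorem pvC_flat_ge (live : List Int) (h0 : 0 < live.length)
    (hmono : ∀ p q (hp : p < live.length) (hq : q < live.length), p ≤ q → live[p] ≤ live[q]) :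
    pvC live 0 0 = live[0] ∧ ∀ j, j < live.length → live[0] ≤ pvC live 0 j := by
  have htake : ∀ m, m ≤ live.length → (m : Int) * live[0] ≤ (live.take m).sum := by
    intro m
    induction m with
    | zero => simp
    | succ m ihm =>
      intro hm1
      have hm : m < live.length := by omega
      have := ihm (by omega)
      rw [List.sum_take_succ live m hm]
      have := hmono 0 m h0 hm (Nat.zero_le m)
      push_cast
      nlinarith
  constructor
  · unfold pvC
    rw [List.sum_take_succ live 0 h0]
    simp
  · intro j hj
    unfold pvC
    refine (Int.le_ediv_iff_mul_le (by omega : (0:Int) < (j : Int) + 1)).mpr ?_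
    have := htake (j + 1) (by omega)
    push_cast at this ⊢
    linarith

-- ===== VERDICT (by name: the statement is the Claim_ definition above) =====
theorem maxRunTime1_spec : Claim_equal_maxRunTime1 := by
  intro n batteries _ hpre
  obtain ⟨hn, hcase⟩ := hpre
  unfold Spec_maxRunTime1
  set bs := PySem.List.sorted batteries (fun x => x) false with hbs
  have hlen : bs.length = batteries.length := PySem.List.length_sorted _ _ _
  have hpw : bs.Pairwise (· ≤ ·) := by
    simpa using PySem.List.sorted_pairwise batteries (fun x => x)
  have hmono_bs : ∀ p q (hp : p < bs.length) (hq : q < bs.length), p ≤ q → bs[p] ≤ bs[q] := by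
    intro p q hp hq hpq
    rcases eq_or_lt_of_le hpq with heq | hlt
    · subst heq; exact le_rfl
    · exact (List.pairwise_iff_getElem.mp hpw) p q hp hq hlt
  have hNpos : 0 < n.toNat := by omega
  have hneg : -n = -((n.toNat : Nat) : Int) := by omega
  have hliveeq : PySem.List.slice bs (some (-n)) none = bs.drop (bs.length - n.toNat) := by
    rw [hneg]; exact PySem.List.slice_from_neg_natCast bs n.toNat hNpos
  have hexeq : PySem.List.slice bs none (some (-n)) = bs.take (bs.length - n.toNat) := by
    rw [hneg]; exact PySem.List.slice_to_neg_natCast bs n.toNat hNpos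
  set K := bs.length - n.toNat with hK
  set live := bs.drop K with hlive
  set E0 := (bs.take K).sum with hE0
  have hrflA : maxRunTime1 n batteries
      = pvALoop live n E0 0 := by
    show pvALoop (PySem.List.slice bs (some (-n)) none) n
        ((PySem.List.slice bs none (some (-n))).sum) 0 = _
    rw [hliveeq, hexeq]
  have hrflB : maxRunTime1_alt n batteries
      = ((live.foldl pvBStep (0, E0, none)).2.2).getD 0 := by
    show (((PySem.List.slice bs (some (-n)) none).foldl pvBStep
        (0, (PySem.List.slice bs none (some (-n))).sum, none)).2.2).getD 0 = _
    rw [hliveeq, hexeq]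
  have hmono : ∀ p q (hp : p < live.length) (hq : q < live.length), p ≤ q → live[p] ≤ live[q] := by
    intro p q hp hq hpq
    simp only [hlive, List.getElem_drop]
    exact hmono_bs (K + p) (K + q) (by rw [hlive, List.length_drop] at hp; omega)
      (by rw [hlive, List.length_drop] at hq; omega) (by omega)
  have h0 : 0 < live.length := by
    rw [hlive, List.length_drop]
    rcases hcase with hle | ⟨a, ha, b, hbm, hab⟩
    · omega
    · have : 0 < batteries.length := List.length_pos_of_mem ha
      omega
  have hBinv := pvBFold_inv live E0 live 0 none (by simp) (Nat.zero_le _) rfl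
  simp only [List.take_zero, List.sum_nil, add_zero, Nat.cast_zero] at hBinv
  rcases hopt : (live.foldl pvBStep (0, E0, none)).2.2 with _ | v
  · rw [hopt] at hBinv
    simp only [] at hBinv
    omega
  · rw [hopt] at hBinv
    obtain ⟨⟨jB, hjB, hveq⟩, hvle⟩ := hBinv
    rw [hrflA, hrflB, hopt]
    simp only [Option.getD_some]
    by_cases hle : n ≤ (batteries.length : Int)
    · -- regime 1: 1 ≤ n ≤ len(batteries)
      have hlenlive : live.length = n.toNat := by
        rw [hlive, List.length_drop]; omega
      have hmin := pvALoop_min live E0 n hlenlive hn hmono 0 h0 E0 (by simp)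
      simp only [Nat.cast_zero] at hmin
      obtain ⟨⟨jA, hjA1, hjA2, hAeq⟩, hAle⟩ := hmin
      apply le_antisymm
      · rw [hveq]
        exact hAle jB (Nat.zero_le _) hjB
      · rw [hAeq]
        exact hvle jA hjA2
    · -- regime 2: n > len(batteries), non-constant batteries
      have hgt : (batteries.length : Int) < n := by omega
      have hK0 : K = 0 := by rw [hK]; omega
      have hliveb : live = bs := by rw [hlive, hK0, List.drop_zero]
      have hE00 : E0 = 0 := by rw [hE0, hK0]; simp
      rcases hcase with hle2 | ⟨a, ha, b, hbm, hab⟩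
      · omega
      · have ha' : a ∈ live := by rw [hliveb, hbs, PySem.List.mem_sorted]; exact ha
        have hb' : b ∈ live := by rw [hliveb, hbs, PySem.List.mem_sorted]; exact hbm
        have hex : ∃ p, 0 < p ∧ ∃ (hp : p < live.length), live[p] ≠ live[0] := by
          by_contra hcon
          push Not at hcon
          have hconst : ∀ x ∈ live, x = live[0]'h0 := by
            intro x hxm
            obtain ⟨p, hp, hpe⟩ := List.mem_iff_getElem.mp hxm
            rcases Nat.eq_zero_or_pos p with hz | hz
            · subst hz; exact hpe.symm
            · rw [← hpe]; exact hcon p hz hp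
          exact hab ((hconst a ha').trans (hconst b hb').symm)
        obtain ⟨p, hp0, hp, hpne⟩ := hex
        have hAres := pvALoop_flat live n h0 (by rw [hliveb, hlen]; exact hgt) hmono
          live.length 0 h0 (by omega)
          (fun p2 hp2 hle2 => by
            have : p2 = 0 := by omega
            subst this; rfl)
          ⟨p, hp0, hp, hpne⟩
        simp only [Nat.cast_zero] at hAres
        rw [hE00, hAres]
        obtain ⟨hc0, hcge⟩ := pvC_flat_ge live h0 hmono
        rw [hE00] at hveq hvle
        apply le_antisymm
        · rw [hveq]
          exact hcge jB hjB
        · calc v ≤ pvC live 0 0 := hvle 0 h0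
            _ = live[0] := hc0
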